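-- pv_equiv track=rewrite | github.com/OceanDECRUZ/IPSA_Project | Rescuing_human_robot/In512.py | fourth_contour
-- ===== SOURCE A (Python) =====
-- N=20 #nombre de pixel en y
--
-- M=20 #nombre de prixel en x
--
-- def first_contour(cell):
--     L=[]
--     for i in range(-1,2):
--         for j in range(-1,2):
--             if (i!=0 or j!=0) and 0<=i+cell[0]<N and 0<=j+cell[1]<M:
--                 L.append((cell[0]+i,cell[1]+j))
--     return L
--
-- def second_contour(cell):
--     L=[]
--     fc=first_contour(cell)
--     for i in range(-2,3):
--         for j in range(-2,3):
--             if (i!=0 or j!=0) and not((i+cell[0],j+cell[1]) in fc) and 0<=i+cell[0]<N and 0<=j+cell[1]<M: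
--                     L.append((cell[0]+i,cell[1]+j))
--     return L
--
-- def third_contour(cell):
--     L=[]
--     fc=first_contour(cell)
--     sc=second_contour(cell)
--     for i in range(-3,4):
--         for j in range(-3,4):
--             if (i!=0 or j!=0) and not((i+cell[0],j+cell[1]) in fc) and not((i+cell[0],j+cell[1]) in sc) and 0<=i+cell[0]<N and 0<=j+cell[1]<M:
--                     L.append((cell[0]+i,cell[1]+j))
--     return L
--
-- def fourth_contour(cell):
--     L=[]
--     fc=first_contour(cell)
--     sc=second_contour(cell)
--     tc=third_contour(cell)
--     for i in range(-4,5):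
--         for j in range(-4,5):
--             if (i!=0 or j!=0) and not((i+cell[0],j+cell[1]) in tc) and not((i+cell[0],j+cell[1]) in fc) and not((i+cell[0],j+cell[1]) in sc) and 0<=i+cell[0]<N and 0<=j+cell[1]<M:
--                     L.append((cell[0]+i,cell[1]+j))
--     return L
-- ===== SOURCE B (Python) =====
-- N = 20
-- M = 20
--
-- def fourth_contour(cell):
--     x, y = cell[0], cell[1]
--     return [(x + i, y + j)
--             for i in range(-4, 5)
--             for j in range(-4, 5)
--             if max(abs(i), abs(j)) == 4 and 0 <= x + i < N and 0 <= y + j < M]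
-- ===== Notes on version B (the rewrite author's own statement) =====
-- stated objective: simpler
-- what changed: B replaces the three cascading contour-list constructions and per-cell membership scans with a single comprehension using the arithmetic Chebyshev-distance test max(|i|,|j|)==4, emitting cells in the same row-major order.
import Mathlib
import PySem

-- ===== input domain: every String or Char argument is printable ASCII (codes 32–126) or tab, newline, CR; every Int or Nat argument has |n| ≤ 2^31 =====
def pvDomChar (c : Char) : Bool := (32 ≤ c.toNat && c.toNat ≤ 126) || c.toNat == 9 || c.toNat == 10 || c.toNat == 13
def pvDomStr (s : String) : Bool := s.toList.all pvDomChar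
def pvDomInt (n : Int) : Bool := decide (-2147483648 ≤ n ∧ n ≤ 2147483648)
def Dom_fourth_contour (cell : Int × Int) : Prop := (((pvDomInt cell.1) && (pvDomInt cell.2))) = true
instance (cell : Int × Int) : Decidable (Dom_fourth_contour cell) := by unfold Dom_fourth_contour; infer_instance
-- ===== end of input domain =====

-- B replaces A's cascading contour lists and membership scans with one comprehension
-- testing Chebyshev distance max(|i|,|j|) == 4 arithmetically (objective: simpler).

-- ===== PORT A =====
def pyN : Int := 20
def pyM : Int := 20

def first_contour (cell : Int × Int) : List (Int × Int) :=
  (PySem.List.pyRange (-1) 2 1).foldl (fun L i =>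
    (PySem.List.pyRange (-1) 2 1).foldl (fun L j =>
      if (i ≠ 0 ∨ j ≠ 0) ∧ 0 ≤ i + cell.1 ∧ i + cell.1 < pyN ∧ 0 ≤ j + cell.2 ∧ j + cell.2 < pyM then
        L ++ [(cell.1 + i, cell.2 + j)]
      else L) L) []

def second_contour (cell : Int × Int) : List (Int × Int) :=
  let fc := first_contour cell
  (PySem.List.pyRange (-2) 3 1).foldl (fun L i =>
    (PySem.List.pyRange (-2) 3 1).foldl (fun L j =>
      if (i ≠ 0 ∨ j ≠ 0) ∧ (i + cell.1, j + cell.2) ∉ fc ∧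
          0 ≤ i + cell.1 ∧ i + cell.1 < pyN ∧ 0 ≤ j + cell.2 ∧ j + cell.2 < pyM then
        L ++ [(cell.1 + i, cell.2 + j)]
      else L) L) []

def third_contour (cell : Int × Int) : List (Int × Int) :=
  let fc := first_contour cell
  let sc := second_contour cell
  (PySem.List.pyRange (-3) 4 1).foldl (fun L i =>
    (PySem.List.pyRange (-3) 4 1).foldl (fun L j =>
      if (i ≠ 0 ∨ j ≠ 0) ∧ (i + cell.1, j + cell.2) ∉ fc ∧ (i + cell.1, j + cell.2) ∉ sc ∧
          0 ≤ i + cell.1 ∧ i + cell.1 < pyN ∧ 0 ≤ j + cell.2 ∧ j + cell.2 < pyM then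
        L ++ [(cell.1 + i, cell.2 + j)]
      else L) L) []

def fourth_contour (cell : Int × Int) : List (Int × Int) :=
  let fc := first_contour cell
  let sc := second_contour cell
  let tc := third_contour cell
  (PySem.List.pyRange (-4) 5 1).foldl (fun L i =>
    (PySem.List.pyRange (-4) 5 1).foldl (fun L j =>
      if (i ≠ 0 ∨ j ≠ 0) ∧ (i + cell.1, j + cell.2) ∉ tc ∧ (i + cell.1, j + cell.2) ∉ fc ∧
          (i + cell.1, j + cell.2) ∉ sc ∧
          0 ≤ i + cell.1 ∧ i + cell.1 < pyN ∧ 0 ≤ j + cell.2 ∧ j + cell.2 < pyM then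
        L ++ [(cell.1 + i, cell.2 + j)]
      else L) L) []

-- ===== PORT B =====
def fourth_contour_alt (cell : Int × Int) : List (Int × Int) :=
  (PySem.List.pyRange (-4) 5 1).flatMap (fun i =>
    (PySem.List.pyRange (-4) 5 1).flatMap (fun j =>
      if max |i| |j| = 4 ∧ 0 ≤ cell.1 + i ∧ cell.1 + i < 20 ∧ 0 ≤ cell.2 + j ∧ cell.2 + j < 20 then
        [(cell.1 + i, cell.2 + j)]
      else []))

-- ===== PRECONDITION & SPEC =====
def Spec_fourth_contour (cell : Int × Int) (out : List (Int × Int)) : Prop := out = fourth_contour_alt cell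
instance (cell : Int × Int) (out : List (Int × Int)) : Decidable (Spec_fourth_contour cell out) := by unfold Spec_fourth_contour; infer_instance

-- ===== CLAIM (what is proved, stated in full; the proofs are below) =====
def Claim_equal_fourth_contour : Prop := ∀ (cell : Int × Int), Dom_fourth_contour cell → Spec_fourth_contour cell (fourth_contour cell)

-- ===== LEMMAS AND PROOFS =====

-- A's nested append loop, as a flatMap of a filtered map.
lemma nest_eq {α : Type} (l : List Int) (P : Int → Int → Prop) [∀ i j, Decidable (P i j)]
    (f : Int → Int → α) :
    l.foldl (fun L i => l.foldl (fun L j => if P i j then L ++ [f i j] else L) L) [] =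
      l.flatMap (fun i => (l.filter (fun j => decide (P i j))).map (f i)) := by
  simp only [PySem.List.foldl_append_ite, PySem.List.foldl_append_eq_flatMap, List.nil_append]

-- B's inner comprehension, in the same filtered-map form.
lemma flatMap_ite_singleton {α : Type} (l : List Int) (P : Int → Prop) [DecidablePred P]
    (f : Int → α) :
    l.flatMap (fun j => if P j then [f j] else []) = (l.filter (fun j => decide (P j))).map f := by
  induction l with
  | nil => rfl
  | cons a t ih => by_cases h : P a <;> simp [h, ih]

lemma mem_fc (x y a b : Int) :
    ((a + x, b + y) ∈ first_contour (x, y)) ↔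
      ((a ≠ 0 ∨ b ≠ 0) ∧ -1 ≤ a ∧ a < 2 ∧ -1 ≤ b ∧ b < 2 ∧
        0 ≤ a + x ∧ a + x < 20 ∧ 0 ≤ b + y ∧ b + y < 20) := by
  simp only [first_contour, PySem.List.foldl_append_ite, PySem.List.foldl_append_eq_flatMap,
    List.nil_append, List.mem_flatMap, List.mem_map, List.mem_filter,
    PySem.List.mem_pyRange_one, decide_eq_true_eq, Prod.mk.injEq, pyN, pyM]
  constructor
  · rintro ⟨i, hi, j, ⟨hj, hc⟩, h1, h2⟩
    omega
  · rintro h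
    exact ⟨a, by omega, b, ⟨by omega, by omega⟩, by omega, by omega⟩

lemma mem_sc (x y a b : Int) :
    ((a + x, b + y) ∈ second_contour (x, y)) ↔
      ((a ≠ 0 ∨ b ≠ 0) ∧ max |a| |b| = 2 ∧
        0 ≤ a + x ∧ a + x < 20 ∧ 0 ≤ b + y ∧ b + y < 20) := by
  simp only [second_contour, PySem.List.foldl_append_ite, PySem.List.foldl_append_eq_flatMap,
    List.nil_append, List.mem_flatMap, List.mem_map, List.mem_filter,
    PySem.List.mem_pyRange_one, decide_eq_true_eq, Prod.mk.injEq, pyN, pyM, mem_fc,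
    Int.abs_eq_natAbs]
  constructor
  · rintro ⟨i, hi, j, ⟨hj, hc⟩, h1, h2⟩
    omega
  · rintro h
    exact ⟨a, by omega, b, ⟨by omega, by omega⟩, by omega, by omega⟩

lemma mem_tc (x y a b : Int) :
    ((a + x, b + y) ∈ third_contour (x, y)) ↔
      ((a ≠ 0 ∨ b ≠ 0) ∧ max |a| |b| = 3 ∧
        0 ≤ a + x ∧ a + x < 20 ∧ 0 ≤ b + y ∧ b + y < 20) := by
  simp only [third_contour, PySem.List.foldl_append_ite, PySem.List.foldl_append_eq_flatMap,
    List.nil_append, List.mem_flatMap, List.mem_map, List.mem_filter,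
    PySem.List.mem_pyRange_one, decide_eq_true_eq, Prod.mk.injEq, pyN, pyM, mem_fc, mem_sc,
    Int.abs_eq_natAbs]
  constructor
  · rintro ⟨i, hi, j, ⟨hj, hc⟩, h1, h2⟩
    omega
  · rintro h
    exact ⟨a, by omega, b, ⟨by omega, by omega⟩, by omega, by omega⟩

lemma main_eq (x y : Int) : fourth_contour (x, y) = fourth_contour_alt (x, y) := by
  unfold fourth_contour fourth_contour_alt
  rw [nest_eq]
  apply List.flatMap_congr
  intro i hi
  rw [flatMap_ite_singleton]
  apply congrArg (List.map _)
  apply List.filter_congr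
  intro j hj
  rw [PySem.List.mem_pyRange_one] at hi hj
  simp only [decide_eq_decide, mem_fc, mem_sc, mem_tc, pyN, pyM, Int.abs_eq_natAbs]
  omega

-- ===== VERDICT (by name: the statement is the Claim_ definition above) =====
theorem fourth_contour_spec : Claim_equal_fourth_contour := by
  intro cell _
  unfold Spec_fourth_contour
  obtain ⟨x, y⟩ := cell
  exact main_eq x y
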